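-- pv_equiv track=rewrite | github.com/SansWord/leetcode_submissions | submissions/3893-generate-tag-for-video-caption/solution.py | generateTag
-- ===== SOURCE A (Python) =====
-- def generateTag(caption: str) -> str:
--     words = [word for word in caption.lower().split(" ") if len(word) != 0]
--     LEN = len(words)
--     if LEN == 0:
--         return "#"
--
--     tagParts = [None for i in range(LEN)]
--
--     tagParts[0] = words[0]
--
--     for i in range(1, LEN):
--         word = words[i]
--         if len(word) == 1:
--             tagParts[i] = word.upper()
--         else:
--             tagParts[i] = word[0].upper() + word[1:]
--
--     return ("#" + "".join(tagParts))[:100]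
-- ===== SOURCE B (Python) =====
-- def generateTag(caption: str) -> str:
--     # single char-by-char scan: skip spaces, lowercase everything,
--     # upper-case the first char of every word after the first
--     out = []
--     first_done = False
--     at_start = True
--     for ch in caption:
--         if ch == ' ':
--             at_start = True
--         else:
--             c = ch.lower()
--             if at_start and first_done:
--                 c = c.upper()
--             out.append(c)
--             at_start = False
--             first_done = True
--     return ('#' + ''.join(out))[:100]
-- ===== Notes on version B (the rewrite author's own statement) =====
-- stated objective: alternative
-- what changed: Replaces lowercase+split-on-space+word-list+per-word capitalization with a single character-by-character scan that keeps two flags (at word start / first word already begun) and emits each output character directly, never materializing a word list.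
import Mathlib
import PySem

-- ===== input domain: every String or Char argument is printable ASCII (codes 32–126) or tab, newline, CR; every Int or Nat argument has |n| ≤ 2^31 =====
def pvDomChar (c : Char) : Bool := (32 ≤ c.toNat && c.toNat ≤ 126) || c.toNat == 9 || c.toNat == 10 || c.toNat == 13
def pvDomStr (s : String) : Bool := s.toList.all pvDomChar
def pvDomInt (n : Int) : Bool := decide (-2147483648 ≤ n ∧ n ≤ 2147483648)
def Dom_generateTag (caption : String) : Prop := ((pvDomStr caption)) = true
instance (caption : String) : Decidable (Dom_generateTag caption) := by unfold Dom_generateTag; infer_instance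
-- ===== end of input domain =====

-- B replaces lower+split(" ")+word list+per-word capitalization by a single char-by-char scan with two flags; alternative decomposition, same cost.

-- ===== PORT A =====
def generateTag (caption : String) : String :=
  match (PySem.Chars.splitOn (PySem.Chars.lower caption.toList) [' ']).filter
      (fun word => word.length != 0) with
  | [] => "#"
  | w0 :: rest =>
    let tagParts := w0 :: rest.map (fun word =>
        if word.length = 1 then PySem.Chars.upper word
        else (match PySem.List.pyGet? word 0 with
              | some c => [PySem.Chars.upperChar c]
              | none => []) ++ PySem.List.slice word (some 1) none)
    String.ofList (PySem.List.slice ('#' :: PySem.Chars.join [] tagParts) none (some 100))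

-- ===== PORT B =====
-- one step of B's scan: state = (output so far, first word begun?, at word start?)
def altStep (st : List Char × Bool × Bool) (ch : Char) : List Char × Bool × Bool :=
  if ch = ' ' then (st.1, st.2.1, true)
  else
    let c := PySem.Chars.lowerChar ch
    let c := if st.2.2 && st.2.1 then PySem.Chars.upperChar c else c
    (st.1 ++ [c], true, false)

def generateTag_alt (caption : String) : String :=
  let st := caption.toList.foldl altStep ([], false, true)
  String.ofList (PySem.List.slice ('#' :: st.1) none (some 100))

-- ===== PRECONDITION & SPEC =====
def Spec_generateTag (caption : String) (out : String) : Prop := out = generateTag_alt caption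
instance (caption : String) (out : String) : Decidable (Spec_generateTag caption out) := by unfold Spec_generateTag; infer_instance

-- ===== CLAIM (what is proved, stated in full; the proofs are below) =====
def Claim_equal_generateTag : Prop := ∀ (caption : String), Dom_generateTag caption → Spec_generateTag caption (generateTag caption)

-- ===== LEMMAS AND PROOFS =====

-- pure-function version of B's scan: fd = first word begun, as = at word start
def fSpec : List Char → Bool → Bool → List Char
  | [], _, _ => []
  | c :: r, fd, as =>
    if c = ' ' then fSpec r fd true
    else (if as && fd then PySem.Chars.upperChar (PySem.Chars.lowerChar c)
          else PySem.Chars.lowerChar c) :: fSpec r true false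

-- split on single spaces, with the current piece accumulated in reverse
def splitSp : List Char → List Char → List (List Char)
  | [], cur => [cur.reverse]
  | c :: r, cur => if c = ' ' then cur.reverse :: splitSp r [] else splitSp r (c :: cur)

-- the nonempty words of a string, head-first
def tokens : List Char → List (List Char)
  | [] => []
  | c :: r =>
    if c = ' ' then tokens r
    else (c :: r.takeWhile (· != ' ')) :: tokens (r.dropWhile (· != ' '))
termination_by cs => cs.length
decreasing_by
  all_goals simp
  have := List.length_dropWhile_le (p := (· != ' ')) (l := r)
  omega

-- capitalize the first character of a word
def capW : List Char → List Char
  | [] => []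
  | c :: t => PySem.Chars.upperChar c :: t

-- render a word list: first word kept (capitalized if fd), later words capitalized
def render : List (List Char) → Bool → List Char
  | [], _ => []
  | w :: ws, fd => (if fd then capW w else w) ++ render ws true

theorem fold_altStep (cs : List Char) : ∀ (out : List Char) (fd as : Bool),
    (cs.foldl altStep (out, fd, as)).1 = out ++ fSpec cs fd as := by
  induction cs with
  | nil => intro out fd as; simp [fSpec]
  | cons c r ih =>
    intro out fd as
    by_cases hc : c = ' ' <;>
      simp [List.foldl_cons, altStep, hc, fSpec, ih]

theorem go_eq_splitSp : ∀ (l : List Char) (fuel : Nat) (cur : List Char) (acc : List (List Char)),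
    l.length < fuel →
    PySem.Chars.splitOn.go [' '] fuel l cur acc = acc.reverse ++ splitSp l cur := by
  intro l
  induction l with
  | nil =>
    intro fuel cur acc h
    rw [PySem.Chars.splitOn.go.eq_def]
    cases fuel with
    | zero => omega
    | succ m => simp [splitSp]
  | cons c rest ihr =>
    intro fuel cur acc h
    cases fuel with
    | zero => omega
    | succ m =>
      rw [PySem.Chars.splitOn.go.eq_def]
      by_cases hc : c = ' '
      · subst hc
        simp only [List.isPrefixOf, BEq.rfl, Bool.and_self, if_pos]
        rw [show List.drop ([' '] : List Char).length (' ' :: rest) = rest from rfl]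
        rw [ihr m [] (cur.reverse :: acc) (by simp at h; omega)]
        simp [splitSp]
      · have hpre : ([' '] : List Char).isPrefixOf (c :: rest) = false := by
          simp [List.isPrefixOf]
          exact fun hh => absurd hh.symm hc
        simp only [hpre, Bool.false_eq_true, if_neg, not_false_iff]
        rw [ihr m (c :: cur) acc (by simp at h; omega)]
        simp [splitSp, hc]

theorem lowerChar_space : PySem.Chars.lowerChar ' ' = ' ' := by decide

theorem lowerChar_eq_space_iff (c : Char) : PySem.Chars.lowerChar c = ' ' ↔ c = ' ' := by
  unfold PySem.Chars.lowerChar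
  split_ifs with hu
  · have hb : 65 ≤ c.toNat ∧ c.toNat ≤ 90 := by
      simp [PySem.Chars.isupper, Char.le_def] at hu
      exact hu
    constructor
    · intro he
      have h1 := congrArg Char.toNat he
      rw [Char.toNat_ofNat] at h1
      have hv : (c.toNat + 32).isValidChar := by
        simp [Nat.isValidChar]; omega
      rw [if_pos hv] at h1
      have h32 : (' ' : Char).toNat = 32 := by decide
      rw [h32] at h1
      omega
    · intro he
      subst he
      exact absurd hu (by decide)
  · exact Iff.rfl

theorem tokens_takeDrop (r : List Char) :
    (if r.takeWhile (· != ' ') = [] then [] else [r.takeWhile (· != ' ')]) ++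
      tokens (r.dropWhile (· != ' ')) = tokens r := by
  cases r with
  | nil => simp [tokens]
  | cons c r' =>
    by_cases hc : c = ' '
    · subst hc
      simp [tokens]
    · simp [tokens, hc]

theorem filter_splitSp : ∀ (l : List Char) (cur : List Char),
    (splitSp l cur).filter (fun w => w.length != 0) =
      (if (cur.reverse ++ l.takeWhile (· != ' ')) = [] then []
       else [cur.reverse ++ l.takeWhile (· != ' ')]) ++ tokens (l.dropWhile (· != ' ')) := by
  intro l
  induction l with
  | nil =>
    intro cur
    by_cases h : cur = [] <;>
      simp [splitSp, tokens, h, List.length_eq_zero_iff]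
  | cons c r ih =>
    intro cur
    by_cases hc : c = ' '
    · subst hc
      rw [show splitSp (' ' :: r) cur = cur.reverse :: splitSp r [] from by simp [splitSp]]
      rw [List.filter_cons]
      rw [ih []]
      have ht := tokens_takeDrop r
      simp only [List.reverse_nil, List.nil_append] at *
      rw [ht]
      by_cases h : cur = [] <;>
        simp [h, tokens, List.length_eq_zero_iff]
    · simp only [splitSp, if_neg hc]
      rw [ih (c :: cur)]
      simp [hc]

theorem tokens_ne_nil_aux : ∀ (n : Nat) (l : List Char), l.length ≤ n → ∀ w ∈ tokens l, w ≠ [] := by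
  intro n
  induction n with
  | zero =>
    intro l hl
    have : l = [] := by cases l <;> simp_all
    subst this; simp [tokens]
  | succ n ihn =>
    intro l hl
    cases l with
    | nil => simp [tokens]
    | cons c r =>
      by_cases hc : c = ' '
      · rw [tokens, if_pos hc]
        exact ihn r (by simp at hl; omega)
      · rw [tokens, if_neg hc]
        intro w hw
        rcases List.mem_cons.1 hw with hw | hw
        · subst hw; simp
        · have hle : (r.dropWhile (· != ' ')).length ≤ n := by
            have := List.length_dropWhile_le (p := (· != ' ')) (l := r)
            simp at hl; omega
          exact ihn _ hle w hw

theorem tokens_ne_nil (l : List Char) : ∀ w ∈ tokens l, w ≠ [] :=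
  tokens_ne_nil_aux l.length l le_rfl

theorem fSpec_render : ∀ (n : Nat) (cs : List Char), cs.length = n →
    (∀ fd : Bool, fSpec cs fd true = render (tokens (PySem.Chars.lower cs)) fd) ∧
    (fSpec cs true false =
      (PySem.Chars.lower cs).takeWhile (· != ' ') ++
        render (tokens ((PySem.Chars.lower cs).dropWhile (· != ' '))) true) := by
  intro n
  induction n using Nat.strong_induction_on with
  | _ n ih =>
    intro cs hlen
    cases cs with
    | nil =>
      exact ⟨fun fd => by simp [fSpec, PySem.Chars.lower, tokens, render],
             by simp [fSpec, PySem.Chars.lower, tokens, render]⟩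
    | cons c r =>
      have hr : r.length < n := by rw [← hlen]; simp
      obtain ⟨IHG, IHM⟩ := ih r.length hr r rfl
      by_cases hc : c = ' '
      · subst hc
        constructor
        · intro fd
          rw [show fSpec (' ' :: r) fd true = fSpec r fd true from by simp [fSpec]]
          rw [IHG fd]
          simp [PySem.Chars.lower, lowerChar_space, tokens]
        · rw [show fSpec (' ' :: r) true false = fSpec r true true from by simp [fSpec]]
          rw [IHG true]
          simp [PySem.Chars.lower, lowerChar_space, tokens]
      · have hlc : PySem.Chars.lowerChar c ≠ ' ' := fun h => hc ((lowerChar_eq_space_iff c).1 h)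
        constructor
        · intro fd
          rw [show fSpec (c :: r) fd true =
              (if fd then PySem.Chars.upperChar (PySem.Chars.lowerChar c)
               else PySem.Chars.lowerChar c) :: fSpec r true false from by simp [fSpec, hc]]
          rw [IHM]
          rw [show PySem.Chars.lower (c :: r) = PySem.Chars.lowerChar c :: PySem.Chars.lower r
              from rfl]
          rw [tokens]
          simp only [if_neg hlc]
          cases fd <;> simp [render, capW]
        · rw [show fSpec (c :: r) true false =
              PySem.Chars.lowerChar c :: fSpec r true false from by simp [fSpec, hc]]
          rw [IHM]
          rw [show PySem.Chars.lower (c :: r) = PySem.Chars.lowerChar c :: PySem.Chars.lower r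
              from rfl]
          simp [hlc]

theorem join_nil_flatten : ∀ (ps : List (List Char)), PySem.Chars.join [] ps = ps.flatten := by
  intro ps
  induction ps with
  | nil => rfl
  | cons p ps ih =>
    cases ps with
    | nil => simp [PySem.Chars.join, List.intercalate]
    | cons q qs =>
      simp only [PySem.Chars.join, List.intercalate] at *
      simp [List.intersperse, List.flatten] at *
      rw [ih]

theorem render_true (ws : List (List Char)) : render ws true = (ws.map capW).flatten := by
  induction ws with
  | nil => simp [render]
  | cons w ws ih => simp [render, ih]

theorem capA_eq (w : List Char) (h : w ≠ []) :
    (if w.length = 1 then PySem.Chars.upper w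
     else (match PySem.List.pyGet? w 0 with
           | some c => [PySem.Chars.upperChar c]
           | none => []) ++ PySem.List.slice w (some 1) none) = capW w := by
  cases w with
  | nil => exact absurd rfl h
  | cons c t =>
    cases t with
    | nil => simp [PySem.Chars.upper, capW]
    | cons d t' =>
      have hl : (c :: d :: t').length ≠ 1 := by simp
      rw [if_neg hl]
      rw [PySem.List.slice_from_one]
      have h0 : (0 : Int) ≤ (t'.length : Int) + 1 := by positivity
      simp [PySem.List.pyGet?, PySem.List.pyIdx?, capW, h0]

-- ===== VERDICT (by name: the statement is the Claim_ definition above) =====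
theorem generateTag_spec : Claim_equal_generateTag := by
  unfold Claim_equal_generateTag
  intro caption _
  unfold Spec_generateTag generateTag generateTag_alt
  have hfold := fold_altStep caption.toList [] false true
  have hG := (fSpec_render caption.toList.length caption.toList rfl).1 false
  have hwords : (PySem.Chars.splitOn (PySem.Chars.lower caption.toList) [' ']).filter
      (fun word => word.length != 0) = tokens (PySem.Chars.lower caption.toList) := by
    unfold PySem.Chars.splitOn
    rw [go_eq_splitSp _ _ _ _ (by omega)]
    simp only [List.reverse_nil, List.nil_append]
    rw [filter_splitSp]
    simpa using tokens_takeDrop (PySem.Chars.lower caption.toList)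
  simp only [hwords, hfold, List.nil_append, hG]
  cases htok : tokens (PySem.Chars.lower caption.toList) with
  | nil => simp [render]; decide
  | cons w0 rest =>
    have hmap : rest.map (fun word =>
        if word.length = 1 then PySem.Chars.upper word
        else (match PySem.List.pyGet? word 0 with
              | some c => [PySem.Chars.upperChar c]
              | none => []) ++ PySem.List.slice word (some 1) none) = rest.map capW := by
      apply List.map_congr_left
      intro w hw
      exact capA_eq w (tokens_ne_nil _ w (by rw [htok]; exact List.mem_cons_of_mem _ hw))
    simp only [hmap, render, join_nil_flatten, render_true, List.flatten_cons,
               Bool.false_eq_true, if_neg, not_false_iff]
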